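-- pv_equiv track=rewrite | github.com/Devensh22345/account-manage | keyboards/__init__.py | create_account_selection_keyboard
-- ===== SOURCE A (Python) =====
-- def create_account_selection_keyboard(accounts, prefix: str, start_idx: int = 0):
--     """Create keyboard for selecting accounts"""
--     keyboard = []
--
--     # Group accounts 2 per row
--     for i in range(0, len(accounts), 2):
--         row = []
--         for j in range(2):
--             if i + j < len(accounts):
--                 account = accounts[i + j]
--                 account_name = account.get('account_name', f'Account {start_idx + i + j + 1}')
--                 row.append({
--                     "text": f"{start_idx + i + j + 1}. {account_name}",
--                     "callback_data": f"{prefix}_account_{account['_id']}"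
--                 })
--         if row:
--             keyboard.append(row)
--
--     return keyboard
-- ===== SOURCE B (Python) =====
-- def create_account_selection_keyboard(accounts, prefix: str, start_idx: int = 0):
--     """Create keyboard for selecting accounts"""
--     buttons = [
--         {
--             "text": f"{start_idx + idx + 1}. "
--                     f"{account.get('account_name', f'Account {start_idx + idx + 1}')}",
--             "callback_data": f"{prefix}_account_{account['_id']}",
--         }
--         for idx, account in enumerate(accounts)
--     ]
--     keyboard = []
--     while buttons:
--         keyboard.append(buttons[:2])
--         buttons = buttons[2:]
--     return keyboard
-- ===== Notes on version B (the rewrite author's own statement) =====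
-- stated objective: simpler
-- what changed: B replaces A's stepped index loop with a nested bounds-guarded inner loop by a single flat pass building all buttons via enumerate, followed by a separate loop chunking the flat button list into rows of two.
import Mathlib
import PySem

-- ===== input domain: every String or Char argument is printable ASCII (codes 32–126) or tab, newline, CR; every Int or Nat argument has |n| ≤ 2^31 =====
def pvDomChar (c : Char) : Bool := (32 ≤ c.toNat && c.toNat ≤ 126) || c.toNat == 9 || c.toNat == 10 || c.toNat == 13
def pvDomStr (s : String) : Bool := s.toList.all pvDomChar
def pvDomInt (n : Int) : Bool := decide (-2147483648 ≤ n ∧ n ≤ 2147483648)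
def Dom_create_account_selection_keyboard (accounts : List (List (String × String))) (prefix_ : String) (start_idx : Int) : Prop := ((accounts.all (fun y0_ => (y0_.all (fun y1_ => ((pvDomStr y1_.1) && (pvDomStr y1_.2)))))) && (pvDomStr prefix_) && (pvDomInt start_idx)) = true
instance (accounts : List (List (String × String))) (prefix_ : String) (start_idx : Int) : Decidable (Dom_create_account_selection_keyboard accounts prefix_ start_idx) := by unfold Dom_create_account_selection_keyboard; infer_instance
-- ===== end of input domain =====

-- ===== PORT A =====
-- B separates button construction (one flat pass) from row grouping (chunks of two): simpler decomposition, same cost.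
-- Note: A raises KeyError when an account dict lacks '_id'; those inputs are excluded by Pre_ below
-- (the ports' `.getD ""` there is never reached under Pre_).

-- Python dict lookup on the association list (first match), shared primitive of both ports.
def pvDictGet (d : List (String × String)) (k : String) : Option String :=
  (d.find? (fun p => p.1 == k)).map (·.2)

-- Literal port of A: for i in range(0, len(accounts), 2): inner j in range(2) with bounds guard;
-- accounts[i+j] is in range under the guard, so pyGetD's default [] is never used.
def create_account_selection_keyboard (accounts : List (List (String × String))) (prefix_ : String) (start_idx : Int) : List (List (List (String × String))) :=
  (PySem.List.pyRange 0 (accounts.length : Int) 2).foldl (fun keyboard i =>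
    let row := (PySem.List.pyRange 0 2 1).foldl (fun row j =>
      if i + j < (accounts.length : Int) then
        let account := PySem.List.pyGetD accounts (i + j) []
        let account_name := (pvDictGet account "account_name").getD
          ("Account " ++ PySem.Int.toStr (start_idx + i + j + 1))
        row ++ [[("text", PySem.Int.toStr (start_idx + i + j + 1) ++ ". " ++ account_name),
                 ("callback_data", prefix_ ++ "_account_" ++ (pvDictGet account "_id").getD "")]]
      else row) []
    if row ≠ [] then keyboard ++ [row] else keyboard) []

-- ===== PORT B =====
-- chunking loop of Source B: while buttons: keyboard.append(buttons[:2]); buttons = buttons[2:]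
def pvChunk2 {α : Type} (xs : List α) : List (List α) :=
  if h : xs = [] then []
  else PySem.List.slice xs none (some 2) :: pvChunk2 (PySem.List.slice xs (some 2) none)
termination_by xs.length
decreasing_by
  have h2 : PySem.List.slice xs (some 2) none = xs.drop (2:Int).toNat :=
    PySem.List.slice_from xs (by omega : (0:Int) ≤ 2)
  rw [h2, List.length_drop]
  have : xs.length ≠ 0 := by simpa using h
  omega

-- Port of B: one flat pass over enumerate(accounts) builds every button, then pvChunk2 groups them.
def create_account_selection_keyboard_alt (accounts : List (List (String × String))) (prefix_ : String) (start_idx : Int) : List (List (List (String × String))) :=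
  let buttons := (PySem.List.enumerate accounts 0).map (fun p =>
    [("text", PySem.Int.toStr (start_idx + p.1 + 1) ++ ". " ++
        (pvDictGet p.2 "account_name").getD ("Account " ++ PySem.Int.toStr (start_idx + p.1 + 1))),
     ("callback_data", prefix_ ++ "_account_" ++ (pvDictGet p.2 "_id").getD "")])
  pvChunk2 buttons

-- ===== PRECONDITION & SPEC =====
-- Pre_ excludes exactly the inputs where Python A raises KeyError: an account dict without an '_id' key.
def Pre_create_account_selection_keyboard (accounts : List (List (String × String))) (prefix_ : String) (start_idx : Int) : Prop :=
  accounts.all (fun d => d.any (fun p => p.1 == "_id")) = true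
instance (accounts : List (List (String × String))) (prefix_ : String) (start_idx : Int) : Decidable (Pre_create_account_selection_keyboard accounts prefix_ start_idx) := by unfold Pre_create_account_selection_keyboard; infer_instance
def pvWitness_create_account_selection_keyboard : (List (List (String × String))) × String × Int :=
  ([[("_id", "7"), ("account_name", "main")], [("_id", "9")]], "sel", 0)

def Spec_create_account_selection_keyboard (accounts : List (List (String × String))) (prefix_ : String) (start_idx : Int) (out : List (List (List (String × String)))) : Prop := out = create_account_selection_keyboard_alt accounts prefix_ start_idx
instance (accounts : List (List (String × String))) (prefix_ : String) (start_idx : Int) (out : List (List (List (String × String)))) : Decidable (Spec_create_account_selection_keyboard accounts prefix_ start_idx out) := by unfold Spec_create_account_selection_keyboard; infer_instance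

-- ===== CLAIM (what is proved, stated in full; the proofs are below) =====
def Claim_equal_create_account_selection_keyboard : Prop := ∀ (accounts : List (List (String × String))) (prefix_ : String) (start_idx : Int), Dom_create_account_selection_keyboard accounts prefix_ start_idx → Pre_create_account_selection_keyboard accounts prefix_ start_idx → Spec_create_account_selection_keyboard accounts prefix_ start_idx (create_account_selection_keyboard accounts prefix_ start_idx)

-- ===== LEMMAS AND PROOFS =====

-- The button both programs build for display number k and a given account dict.
def pvBtn (prefix_ : String) (k : Int) (account : List (String × String)) : List (String × String) :=
  [("text", PySem.Int.toStr k ++ ". " ++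
      (pvDictGet account "account_name").getD ("Account " ++ PySem.Int.toStr k)),
   ("callback_data", prefix_ ++ "_account_" ++ (pvDictGet account "_id").getD "")]

-- Common recursive characterisation: keyboard for the remaining accounts, two per row,
-- first display number k.
def pvSpecKb (prefix_ : String) : Int → List (List (String × String)) → List (List (List (String × String)))
  | _, [] => []
  | k, [a] => [[pvBtn prefix_ k a]]
  | k, a :: b :: r => [pvBtn prefix_ k a, pvBtn prefix_ (k+1) b] :: pvSpecKb prefix_ (k+2) r

-- A's outer loop body, abstracted by name (definitionally equal to the lambda in port A).
def pvStepA (full : List (List (String × String))) (prefix_ : String) (start_idx : Int) :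
    List (List (List (String × String))) → Int → List (List (List (String × String))) :=
  fun keyboard i =>
    let row := (PySem.List.pyRange 0 2 1).foldl (fun row j =>
      if i + j < (full.length : Int) then
        let account := PySem.List.pyGetD full (i + j) []
        let account_name := (pvDictGet account "account_name").getD
          ("Account " ++ PySem.Int.toStr (start_idx + i + j + 1))
        row ++ [[("text", PySem.Int.toStr (start_idx + i + j + 1) ++ ". " ++ account_name),
                 ("callback_data", prefix_ ++ "_account_" ++ (pvDictGet account "_id").getD "")]]
      else row) []
    if row ≠ [] then keyboard ++ [row] else keyboard

theorem pvRange2_nil (a b : Int) (h : b ≤ a) : PySem.List.pyRange a b 2 = [] := by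
  rw [PySem.List.pyRange_of_pos a b (by omega)]
  rw [if_neg (by omega : ¬ a < b)]
  simp

theorem pvRange2_cons (a b : Int) (h : a < b) :
    PySem.List.pyRange a b 2 = a :: PySem.List.pyRange (a+2) b 2 := by
  rw [PySem.List.pyRange_of_pos a b (by omega), PySem.List.pyRange_of_pos (a+2) b (by omega)]
  by_cases h2 : a + 2 < b
  · rw [if_pos h, if_pos h2]
    have hc : ((b - a + 2 - 1) / 2).toNat = ((b - (a+2) + 2 - 1) / 2).toNat + 1 := by omega
    rw [hc, List.range_succ_eq_map, List.map_cons, List.map_map]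
    refine congrArg₂ _ (by ring) ?_
    refine List.map_congr_left (fun k _ => ?_)
    simp only [Function.comp_apply]
    push_cast
    ring
  · rw [if_pos h, if_neg h2]
    have hc : ((b - a + 2 - 1) / 2).toNat = 1 := by omega
    rw [hc]
    simp

theorem pvRange01 : PySem.List.pyRange 0 2 1 = [0, 1] := by decide

theorem pvGetD_drop (full : List (List (String × String))) (i : Nat) (a : List (String × String))
    (t : List (List (String × String))) (hdrop : full.drop i = a :: t) :
    PySem.List.pyGetD full (i : Int) [] = a := by
  have h0 : full[i + 0]? = some a := by
    rw [← List.getElem?_drop, hdrop]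
    simp
  rw [Nat.add_zero] at h0
  rw [PySem.List.pyGetD_natCast]
  simp [List.getD_eq_getElem?_getD, h0]

theorem pvA_loop (full : List (List (String × String))) (prefix_ : String) (start_idx : Int)
    (todo : List (List (String × String))) (i : Nat)
    (acc : List (List (List (String × String))))
    (hdrop : full.drop i = todo) (hlen : full.length = i + todo.length) :
    List.foldl (pvStepA full prefix_ start_idx) acc
      (PySem.List.pyRange (i : Int) (full.length : Int) 2)
    = acc ++ pvSpecKb prefix_ (start_idx + i + 1) todo := by
  match todo with
  | [] =>
    have hlen0 : full.length = i := by simpa using hlen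
    rw [pvRange2_nil _ _ (by push_cast; omega), List.foldl_nil]
    simp [pvSpecKb]
  | [a] =>
    have hlen1 : full.length = i + 1 := by simpa using hlen
    have hstep : pvStepA full prefix_ start_idx acc (i : Int)
        = acc ++ [[pvBtn prefix_ (start_idx + (i : Int) + 1) a]] := by
      have c1 : ((i : Int)) < (full.length : Int) := by push_cast; omega
      have c2 : ¬ (((i : Int)) + 1 < (full.length : Int)) := by push_cast; omega
      have g1 : PySem.List.pyGetD full ((i : Int)) [] = a := pvGetD_drop full i a [] hdrop
      unfold pvStepA
      rw [pvRange01]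
      simp [List.foldl, c1, c2, g1, pvBtn]
    rw [pvRange2_cons _ _ (by push_cast; omega), List.foldl_cons,
        pvRange2_nil _ _ (by push_cast; omega), List.foldl_nil, hstep]
    simp [pvSpecKb]
  | a :: b :: r =>
    have hlen' : full.length = i + r.length + 2 := by
      simp only [List.length_cons] at hlen
      omega
    have hdrop1 : full.drop (i + 1) = b :: r := by
      have h' := congrArg (List.drop 1) hdrop
      rw [List.drop_drop] at h'
      simpa [Nat.add_comm] using h'
    have hdrop2 : full.drop (i + 2) = r := by
      have h' := congrArg (List.drop 2) hdrop
      rw [List.drop_drop] at h'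
      simpa [Nat.add_comm] using h'
    have h1 : ((i : Int) + 1) = ((i + 1 : Nat) : Int) := by push_cast; ring
    have h2 : ((i : Int) + 2) = ((i + 2 : Nat) : Int) := by push_cast; ring
    have hstep : pvStepA full prefix_ start_idx acc (i : Int)
        = acc ++ [[pvBtn prefix_ (start_idx + (i : Int) + 1) a,
                   pvBtn prefix_ (start_idx + (i : Int) + 1 + 1) b]] := by
      have c1 : ((i : Int)) < (full.length : Int) := by push_cast; omega
      have c2 : ((i : Int)) + 1 < (full.length : Int) := by push_cast; omega
      have g1 : PySem.List.pyGetD full ((i : Int)) [] = a := pvGetD_drop full i a _ hdrop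
      have g2 : PySem.List.pyGetD full (((i : Int)) + 1) [] = b := by
        rw [h1]
        exact pvGetD_drop full (i + 1) b r hdrop1
      unfold pvStepA
      rw [pvRange01]
      simp [List.foldl, c1, c2, g1, g2, pvBtn]
    rw [pvRange2_cons _ _ (by push_cast; omega), List.foldl_cons, hstep, h2,
        pvA_loop full prefix_ start_idx r (i + 2) _ hdrop2 (by omega)]
    have e3 : start_idx + ((i + 2 : Nat) : Int) + 1 = start_idx + (i : Int) + 1 + 2 := by
      push_cast
      ring
    rw [e3]
    simp [pvSpecKb, List.append_assoc]
termination_by todo.length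

theorem pvChunk2_nil {α : Type} : pvChunk2 ([] : List α) = [] := by
  rw [pvChunk2.eq_def]
  simp

theorem pvChunk2_cons {α : Type} (xs : List α) (h : xs ≠ []) :
    pvChunk2 xs = xs.take 2 :: pvChunk2 (xs.drop 2) := by
  conv_lhs => rw [pvChunk2.eq_def]
  rw [dif_neg h]
  rw [PySem.List.slice_to xs (by omega : (0:Int) ≤ 2),
      PySem.List.slice_from xs (by omega : (0:Int) ≤ 2)]
  rw [show ((2:Int).toNat) = 2 from rfl]

theorem pvChunk2_single {α : Type} (u : α) : pvChunk2 [u] = [[u]] := by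
  rw [pvChunk2_cons _ (by simp)]
  rw [show List.take 2 [u] = [u] from rfl, show List.drop 2 [u] = ([] : List α) from rfl,
      pvChunk2_nil]

theorem pvChunk2_pair {α : Type} (u v : α) (rest : List α) :
    pvChunk2 (u :: v :: rest) = [u, v] :: pvChunk2 rest := by
  rw [pvChunk2_cons _ (by simp)]
  rw [show List.take 2 (u :: v :: rest) = [u, v] from rfl,
      show List.drop 2 (u :: v :: rest) = rest from rfl]

theorem pvB_chunk (prefix_ : String) (start_idx : Int)
    (xs : List (List (String × String))) (s : Int) :
    pvChunk2 ((PySem.List.enumerate xs s).map (fun p =>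
      [("text", PySem.Int.toStr (start_idx + p.1 + 1) ++ ". " ++
          (pvDictGet p.2 "account_name").getD ("Account " ++ PySem.Int.toStr (start_idx + p.1 + 1))),
       ("callback_data", prefix_ ++ "_account_" ++ (pvDictGet p.2 "_id").getD "")]))
    = pvSpecKb prefix_ (start_idx + s + 1) xs := by
  match xs with
  | [] =>
    simp [PySem.List.enumerate_nil, pvChunk2_nil, pvSpecKb]
  | [a] =>
    rw [PySem.List.enumerate_cons, PySem.List.enumerate_nil, List.map_cons, List.map_nil,
        pvChunk2_single]
    simp [pvSpecKb, pvBtn]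
  | a :: b :: r =>
    rw [PySem.List.enumerate_cons, PySem.List.enumerate_cons, List.map_cons, List.map_cons,
        pvChunk2_pair]
    rw [pvB_chunk prefix_ start_idx r (s + 1 + 1)]
    simp only [pvSpecKb]
    have e2 : start_idx + (s + 1) + 1 = start_idx + s + 1 + 1 := by ring
    have e3 : start_idx + (s + 1 + 1) + 1 = start_idx + s + 1 + 2 := by ring
    rw [e2, e3]
    simp [pvBtn]
termination_by xs.length

-- ===== VERDICT (by name: the statement is the Claim_ definition above) =====
theorem create_account_selection_keyboard_spec : Claim_equal_create_account_selection_keyboard := by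
  intro accounts prefix_ start_idx _ _
  unfold Spec_create_account_selection_keyboard
  have hA : create_account_selection_keyboard accounts prefix_ start_idx
      = [] ++ pvSpecKb prefix_ (start_idx + ((0 : Nat) : Int) + 1) accounts :=
    pvA_loop accounts prefix_ start_idx accounts 0 [] rfl (by omega)
  have hB : create_account_selection_keyboard_alt accounts prefix_ start_idx
      = pvSpecKb prefix_ (start_idx + 0 + 1) accounts :=
    pvB_chunk prefix_ start_idx accounts 0
  rw [hA, hB]
  norm_num
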